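-- pv_equiv track=rewrite | github.com/vinchinzu/euler | python/890.py | partition_powers_of_2
-- ===== SOURCE A (Python) =====
-- def partition_powers_of_2(n, mod=10**9 + 7):
--     """
--     Compute p(n) mod 'mod' where p(n) counts partitions of n into powers of 2.
--
--     Uses standard DP for numbers up to about 10^7.
--     """
--     if n == 0:
--         return 1
--
--     # dp[i] = number of partitions of i into powers of 2
--     dp = [0] * (n + 1)
--     dp[0] = 1
--
--     # For each power of 2 up to n
--     power = 1
--     while power <= n:
--         # Update: for each value i, we can add 'power' to partitions of (i-power)
--         for i in range(power, n + 1):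
--             dp[i] = (dp[i] + dp[i - power]) % mod
--         power *= 2
--
--     return dp[n]
-- ===== SOURCE B (Python) =====
-- def partition_powers_of_2(n, mod=10**9 + 7):
--     if n == 0:
--         return 1
--     b = [0] * (n + 1)
--     b[0] = 1
--     for i in range(1, n + 1):
--         if i & 1:
--             b[i] = b[i - 1] % mod
--         else:
--             b[i] = (b[i - 1] + b[i >> 1]) % mod
--     return b[n]
-- ===== Notes on version B (the rewrite author's own statement) =====
-- stated objective: faster
-- what changed: Replaces the coin-DP over all powers of 2 (a full array pass per power, O(n log n) updates) by the binary-partition recurrence b(2k+1)=b(2k), b(2k)=b(2k-1)+b(k), filled left-to-right in one linear pass (O(n) updates).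
import Mathlib
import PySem

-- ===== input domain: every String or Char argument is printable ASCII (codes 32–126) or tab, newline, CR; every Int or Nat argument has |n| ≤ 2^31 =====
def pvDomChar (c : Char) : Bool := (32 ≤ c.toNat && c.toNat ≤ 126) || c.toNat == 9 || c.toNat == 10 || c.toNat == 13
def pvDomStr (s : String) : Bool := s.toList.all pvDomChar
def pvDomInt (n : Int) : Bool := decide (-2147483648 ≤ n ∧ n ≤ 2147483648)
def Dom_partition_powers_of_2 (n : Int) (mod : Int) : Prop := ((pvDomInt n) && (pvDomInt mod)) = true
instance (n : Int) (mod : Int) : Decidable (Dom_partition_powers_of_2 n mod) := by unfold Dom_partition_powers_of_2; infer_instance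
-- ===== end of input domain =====

-- B replaces A's coin-DP over all powers of 2 (one array pass per power) by the
-- binary-partition recurrence b(2k+1)=b(2k), b(2k)=b(2k-1)+b(k) filled in one linear pass.


-- ===== PORT A =====
-- dp[i] = (dp[i] + dp[i - power]) % mod   (indices are nonnegative in Python here, so Nat indexing is exact)
def pvAStep (m : Int) (power : Nat) (dp : List Int) (i : Nat) : List Int :=
  dp.set i (PySem.Int.mod (dp.getD i 0 + dp.getD (i - power) 0) m)

-- for i in range(power, n + 1): ...
def pvAPass (n : Int) (m : Int) (power : Nat) (dp : List Int) : List Int :=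
  (List.range' power ((n + 1).toNat - power)).foldl (pvAStep m power) dp

-- while power <= n: ... ; power *= 2.  Ported with structural fuel: the caller passes
-- fuel = (n+1).toNat, which always suffices since power starts at 1 and doubles while ≤ n
-- ('1 ≤ power' and the fuel are totality guards only; the computation is Python's).
def pvALoop (n : Int) (m : Int) : Nat → Nat → List Int → List Int
  | 0, _, dp => dp
  | fuel + 1, power, dp =>
    if 1 ≤ power ∧ (power : Int) ≤ n then
      pvALoop n m fuel (power * 2) (pvAPass n m power dp)
    else dp

def partition_powers_of_2 (n : Int) (mod : Int) : Int :=
  if n = 0 then 1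
  else (pvALoop n mod (n + 1).toNat 1 ((List.replicate (n + 1).toNat 0).set 0 1)).getD n.toNat 0

-- ===== PORT B =====
-- b[i] = b[i-1] % mod if i & 1 else (b[i-1] + b[i >> 1]) % mod
def pvBStep (m : Int) (b : List Int) (i : Nat) : List Int :=
  b.set i (if i &&& 1 = 1 then PySem.Int.mod (b.getD (i - 1) 0) m
           else PySem.Int.mod (b.getD (i - 1) 0 + b.getD (i >>> 1) 0) m)

def partition_powers_of_2_alt (n : Int) (mod : Int) : Int :=
  if n = 0 then 1
  else ((List.range' 1 n.toNat).foldl (pvBStep mod) ((List.replicate (n + 1).toNat 0).set 0 1)).getD n.toNat 0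

-- ===== PRECONDITION & SPEC =====
-- Pre_ excludes exactly the inputs on which A raises: n < 0 (IndexError on dp[0] = 1 of the
-- empty list) and n ≥ 1 with mod = 0 (ZeroDivisionError); B raises on those same inputs.
def Pre_partition_powers_of_2 (n : Int) (mod : Int) : Prop := 0 ≤ n ∧ (n = 0 ∨ mod ≠ 0)
instance (n : Int) (mod : Int) : Decidable (Pre_partition_powers_of_2 n mod) := by unfold Pre_partition_powers_of_2; infer_instance
def pvWitness_partition_powers_of_2 : Int × Int := (6, 5)

def Spec_partition_powers_of_2 (n : Int) (mod : Int) (out : Int) : Prop := out = partition_powers_of_2_alt n mod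
instance (n : Int) (mod : Int) (out : Int) : Decidable (Spec_partition_powers_of_2 n mod out) := by unfold Spec_partition_powers_of_2; infer_instance

-- ===== CLAIM (what is proved, stated in full; the proofs are below) =====
def Claim_equal_partition_powers_of_2 : Prop := ∀ (n : Int) (mod : Int), Dom_partition_powers_of_2 n mod → Pre_partition_powers_of_2 n mod → Spec_partition_powers_of_2 n mod (partition_powers_of_2 n mod)

-- ===== LEMMAS AND PROOFS =====

-- the number of partitions of i into powers of 2 (binary partition function)
def pvBp : Nat → Nat
  | 0 => 1
  | i + 1 => if (i + 1) % 2 = 1 then pvBp i else pvBp i + pvBp ((i + 1) / 2)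
  termination_by i => i
  decreasing_by all_goals omega

lemma pvBp_zero : pvBp 0 = 1 := by rw [pvBp]

lemma pvBp_succ (i : Nat) :
    pvBp (i + 1) = if (i + 1) % 2 = 1 then pvBp i else pvBp i + pvBp ((i + 1) / 2) := by
  rw [pvBp]

-- the number of partitions of i into the powers 2^0 .. 2^(c-1)  (c coins; 0 coins ⟹ only i = 0)
def pvPw : Nat → Nat → Nat
  | 0, i => if i = 0 then 1 else 0
  | c + 1, i =>
    if h : 2 ^ c ≤ i then pvPw (c + 1) (i - 2 ^ c) + pvPw c i else pvPw c i
  termination_by c i => c + i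
  decreasing_by
    all_goals (have h2 := Nat.one_le_two_pow (n := c); omega)

lemma pvPw_base (i : Nat) : pvPw 0 i = if i = 0 then 1 else 0 := by rw [pvPw]

lemma pvPw_succ (c i : Nat) :
    pvPw (c + 1) i = if 2 ^ c ≤ i then pvPw (c + 1) (i - 2 ^ c) + pvPw c i else pvPw c i := by
  rw [pvPw]; split <;> rfl

lemma pvPw_zero_right (c : Nat) : pvPw c 0 = 1 := by
  induction c with
  | zero => simp [pvPw_base]
  | succ d ih =>
    rw [pvPw_succ, if_neg (by have := Nat.one_le_two_pow (n := d); omega)]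
    exact ih

lemma pvPw_one (i : Nat) : pvPw 1 i = 1 := by
  induction i with
  | zero => exact pvPw_zero_right 1
  | succ t ih =>
    rw [pvPw_succ, if_pos (by simp)]
    simp only [pow_zero]
    rw [show t + 1 - 1 = t from rfl, ih, pvPw_base, if_neg (by omega)]

lemma pvPw_lt (c i : Nat) (h : i < 2 ^ c) : pvPw (c + 1) i = pvPw c i := by
  rw [pvPw_succ, if_neg (by omega)]

lemma pvPw_odd : ∀ c k, pvPw (c + 1) (2 * k + 1) = pvPw (c + 1) (2 * k) := by
  intro c
  induction c with
  | zero => intro k; rw [pvPw_one, pvPw_one]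
  | succ d ihd =>
    intro k
    induction k using Nat.strong_induction_on with
    | _ k ihk =>
      have hp : 2 ^ (d + 1) = 2 * 2 ^ d := by rw [pow_succ]; ring
      have hd1 := Nat.one_le_two_pow (n := d)
      by_cases h : 2 ^ (d + 1) ≤ 2 * k
      · have h1 : 2 ^ (d + 1) ≤ 2 * k + 1 := by omega
        rw [pvPw_succ (d + 1) (2 * k + 1), pvPw_succ (d + 1) (2 * k), if_pos h1, if_pos h]
        rw [show 2 * k + 1 - 2 ^ (d + 1) = 2 * (k - 2 ^ d) + 1 by omega,
            show 2 * k - 2 ^ (d + 1) = 2 * (k - 2 ^ d) by omega,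
            ihk (k - 2 ^ d) (by omega), ihd]
      · have h1 : ¬ 2 ^ (d + 1) ≤ 2 * k + 1 := by omega
        rw [pvPw_succ (d + 1) (2 * k + 1), pvPw_succ (d + 1) (2 * k), if_neg h1, if_neg h, ihd]

lemma pvPw_even : ∀ c k, 1 ≤ k → pvPw (c + 1) (2 * k) = pvPw (c + 1) (2 * k - 1) + pvPw c k := by
  intro c
  induction c with
  | zero =>
    intro k hk
    rw [pvPw_one, pvPw_one, pvPw_base, if_neg (by omega)]
  | succ d ihd =>
    intro k
    induction k using Nat.strong_induction_on with
    | _ k ihk =>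
      intro hk
      have hp : 2 ^ (d + 1) = 2 * 2 ^ d := by rw [pow_succ]; ring
      have hd1 := Nat.one_le_two_pow (n := d)
      by_cases h : 2 ^ d ≤ k
      · by_cases he : k = 2 ^ d
        · have hA : pvPw (d + 1 + 1) (2 * k) = 1 + pvPw (d + 1) (2 * k) := by
            rw [pvPw_succ (d + 1) (2 * k), if_pos (by omega),
                show 2 * k - 2 ^ (d + 1) = 0 by omega, pvPw_zero_right]
          have hB : pvPw (d + 1) (2 * k) = pvPw (d + 1) (2 * k - 1) + pvPw d k := ihd k hk
          have hC : pvPw (d + 1 + 1) (2 * k - 1) = pvPw (d + 1) (2 * k - 1) :=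
            pvPw_lt _ _ (by omega)
          have hD : pvPw (d + 1) k = 1 + pvPw d k := by
            rw [pvPw_succ d k, if_pos h, show k - 2 ^ d = 0 by omega, pvPw_zero_right]
          omega
        · have hk' : 1 ≤ k - 2 ^ d := by omega
          have hA : pvPw (d + 1 + 1) (2 * k) =
              pvPw (d + 1 + 1) (2 * (k - 2 ^ d)) + pvPw (d + 1) (2 * k) := by
            rw [pvPw_succ (d + 1) (2 * k), if_pos (by omega),
                show 2 * k - 2 ^ (d + 1) = 2 * (k - 2 ^ d) by omega]
          have hB := ihk (k - 2 ^ d) (by omega) hk'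
          have hC := ihd k hk
          have hD : pvPw (d + 1 + 1) (2 * k - 1) =
              pvPw (d + 1 + 1) (2 * (k - 2 ^ d) - 1) + pvPw (d + 1) (2 * k - 1) := by
            rw [pvPw_succ (d + 1) (2 * k - 1), if_pos (by omega),
                show 2 * k - 1 - 2 ^ (d + 1) = 2 * (k - 2 ^ d) - 1 by omega]
          have hE : pvPw (d + 1) k = pvPw (d + 1) (k - 2 ^ d) + pvPw d k := by
            rw [pvPw_succ d k, if_pos h]
          omega
      · have hA : pvPw (d + 1 + 1) (2 * k) = pvPw (d + 1) (2 * k) := pvPw_lt _ _ (by omega)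
        have hB := ihd k hk
        have hC : pvPw (d + 1 + 1) (2 * k - 1) = pvPw (d + 1) (2 * k - 1) :=
          pvPw_lt _ _ (by omega)
        have hD : pvPw (d + 1) k = pvPw d k := pvPw_lt _ _ (by omega)
        omega

-- with all coins 2^0..2^(c-1) available and i < 2^c, pvPw counts all binary partitions
lemma pvPw_eq_bp : ∀ i c, 1 ≤ c → i < 2 ^ c → pvPw c i = pvBp i := by
  intro i
  induction i using Nat.strong_induction_on with
  | _ i ih =>
    intro c hc hlt
    obtain ⟨d, rfl⟩ : ∃ d, c = d + 1 := ⟨c - 1, by omega⟩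
    rcases Nat.eq_zero_or_pos i with h0 | hi
    · subst h0; rw [pvPw_zero_right, pvBp_zero]
    · rcases Nat.even_or_odd i with ⟨k, hk⟩ | ⟨k, hk⟩
      · -- i = k + k, k ≥ 1
        subst hk
        have hk1 : 1 ≤ k := by omega
        have hd : 1 ≤ d := by
          rcases Nat.eq_zero_or_pos d with h | h
          · subst h
            have : (2 : Nat) ^ (0 + 1) = 2 := by norm_num
            omega
          · exact h
        have h2k : k + k = 2 * k := by omega
        rw [h2k]
        have hpp : 2 ^ (d + 1) = 2 * 2 ^ d := by rw [pow_succ]; ring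
        have h1 : pvPw (d + 1) (2 * k) = pvPw (d + 1) (2 * k - 1) + pvPw d k :=
          pvPw_even d k hk1
        have h2 : pvPw (d + 1) (2 * k - 1) = pvBp (2 * k - 1) :=
          ih (2 * k - 1) (by omega) (d + 1) hc (by omega)
        have h3 : pvPw d k = pvBp k := ih k (by omega) d hd (by omega)
        have h4 : pvBp (2 * k) = pvBp (2 * k - 1) + pvBp k := by
          have heq := pvBp_succ (2 * k - 1)
          rw [show 2 * k - 1 + 1 = 2 * k by omega] at heq
          rw [heq, if_neg (by omega), show 2 * k / 2 = k by omega]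
        omega
      · -- i = 2k + 1
        subst hk
        have h1 : pvPw (d + 1) (2 * k + 1) = pvPw (d + 1) (2 * k) := pvPw_odd d k
        have h2 : pvPw (d + 1) (2 * k) = pvBp (2 * k) :=
          ih (2 * k) (by omega) (d + 1) hc (by omega)
        have h3 : pvBp (2 * k + 1) = pvBp (2 * k) := by
          rw [pvBp_succ (2 * k), if_pos (by omega)]
        omega

-- list indexing toolkit
lemma pvGetD_set (L : List Int) (i j : Nat) (v : Int) :
    (L.set i v).getD j 0 = if i = j ∧ i < L.length then v else L.getD j 0 := by
  simp only [List.getD_eq_getElem?_getD, List.getElem?_set]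
  by_cases h1 : i = j
  · subst h1
    by_cases h2 : i < L.length
    · simp [h2]
    · simp [h2]
  · simp [h1]

lemma pvInit_getD (N j : Nat) (hj : j ≤ N) :
    ((List.replicate (N + 1) (0 : Int)).set 0 1).getD j 0 = if j = 0 then 1 else 0 := by
  rw [pvGetD_set]
  by_cases h : j = 0
  · simp [h]
  · simp only [List.length_replicate]
    rw [if_neg (by omega), if_neg h]
    simp [List.getD_eq_getElem?_getD, Nat.lt_succ_of_le hj]

lemma pvB_foldl_length (m : Int) : ∀ (l : List Nat) (b : List Int),
    (l.foldl (pvBStep m) b).length = b.length := by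
  intro l
  induction l with
  | nil => intro b; rfl
  | cons x xs ih =>
    intro b
    simp only [List.foldl_cons]
    rw [ih]
    simp [pvBStep]

-- invariant of B's single pass: after processing i = 1..t, slot j holds pvBp j reduced mod m
lemma pvB_inv (m : Int) (N : Nat) : ∀ t, t ≤ N → ∀ j, j ≤ N →
    ((List.range' 1 t).foldl (pvBStep m) ((List.replicate (N + 1) (0 : Int)).set 0 1)).getD j 0
      = if j = 0 then 1 else if j ≤ t then Int.fmod (pvBp j) m else 0 := by
  intro t
  induction t with
  | zero =>
    intro _ j hj
    simp only [List.range', List.foldl_nil]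
    rw [pvInit_getD N j hj]
    by_cases h : j = 0
    · simp [h]
    · rw [if_neg h, if_neg h, if_neg (by omega)]
  | succ t ih =>
    intro ht j hj
    have ht' : t ≤ N := by omega
    rw [show List.range' 1 (t + 1) = List.range' 1 t ++ [1 + 1 * t] from List.range'_concat,
        List.foldl_append]
    set P := (List.range' 1 t).foldl (pvBStep m) ((List.replicate (N + 1) (0 : Int)).set 0 1)
      with hP
    have hPlen : P.length = N + 1 := by
      rw [hP, pvB_foldl_length]; simp
    have hget0 : P.getD 0 0 = 1 := by rw [hP, ih ht' 0 (by omega)]; simp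
    have hget1 : ∀ j', 1 ≤ j' → j' ≤ t → P.getD j' 0 = Int.fmod (pvBp j') m := by
      intro j' h1 h2
      rw [hP, ih ht' j' (by omega), if_neg (by omega), if_pos h2]
    simp only [List.foldl_cons, List.foldl_nil]
    have key : pvBStep m P (1 + 1 * t) = P.set (t + 1) (Int.fmod (pvBp (t + 1)) m) := by
      rw [show 1 + 1 * t = t + 1 by omega]
      unfold pvBStep
      simp only [PySem.Int.mod]
      congr 1
      by_cases hpar : (t + 1) % 2 = 1
      · rw [if_pos (by rw [Nat.and_one_is_mod]; omega)]
        rcases Nat.eq_zero_or_pos t with h0 | h1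
        · subst h0
          rw [show 0 + 1 - 1 = 0 from rfl, hget0,
              show pvBp (0 + 1) = 1 by rw [pvBp_succ]; simp [pvBp_zero]]
          norm_num
        · rw [show t + 1 - 1 = t from rfl, hget1 t h1 le_rfl, Int.fmod_fmod,
              pvBp_succ, if_pos hpar]
      · rw [if_neg (by rw [Nat.and_one_is_mod]; omega)]
        have htt : 1 ≤ t := by omega
        have hsh : (t + 1) >>> 1 = (t + 1) / 2 := Nat.shiftRight_one _
        have hh1 : 1 ≤ (t + 1) / 2 := by omega
        have hh2 : (t + 1) / 2 ≤ t := by omega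
        rw [show t + 1 - 1 = t from rfl, hsh, hget1 t htt le_rfl,
            hget1 ((t + 1) / 2) hh1 hh2, ← Int.add_fmod, pvBp_succ, if_neg hpar]
        push_cast
        ring_nf
    rw [key, pvGetD_set]
    by_cases hji : j = t + 1
    · subst hji
      rw [if_pos ⟨rfl, by omega⟩, if_neg (by omega), if_pos le_rfl]
    · rw [if_neg (by intro hcon; exact hji hcon.1.symm)]
      by_cases hj0 : j = 0
      · rw [hP, ih ht' j hj, if_pos hj0, if_pos hj0]
      · rw [hP, ih ht' j hj, if_neg hj0, if_neg hj0]
        by_cases hjt : j ≤ t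
        · rw [if_pos hjt, if_pos (by omega)]
        · rw [if_neg hjt, if_neg (by omega)]

-- invariant of one of A's coin passes: coin 2^c upgrades the array from pvPw c to pvPw (c+1)
lemma pvA_pass (m : Int) (N c : Nat) : ∀ (len : Nat) (dp : List Int), 2 ^ c + len ≤ N + 1 →
    dp.length = N + 1 → dp.getD 0 0 = 1 →
    (∀ j, 1 ≤ j → j ≤ N → dp.getD j 0 = Int.fmod (pvPw c j) m) →
    ((List.range' (2 ^ c) len).foldl (pvAStep m (2 ^ c)) dp).length = N + 1 ∧
    ((List.range' (2 ^ c) len).foldl (pvAStep m (2 ^ c)) dp).getD 0 0 = 1 ∧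
    (∀ j, 1 ≤ j → j < 2 ^ c + len →
      ((List.range' (2 ^ c) len).foldl (pvAStep m (2 ^ c)) dp).getD j 0
        = Int.fmod (pvPw (c + 1) j) m) ∧
    (∀ j, 2 ^ c + len ≤ j → j ≤ N →
      ((List.range' (2 ^ c) len).foldl (pvAStep m (2 ^ c)) dp).getD j 0
        = Int.fmod (pvPw c j) m) := by
  intro len
  induction len with
  | zero =>
    intro dp hlen h1 h2 h3
    simp only [List.range', List.foldl_nil]
    have hc1 := Nat.one_le_two_pow (n := c)
    refine ⟨h1, h2, ?_, ?_⟩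
    · intro j hj1 hj2
      rw [pvPw_lt c j (by omega), h3 j hj1 (by omega)]
    · intro j hj0 hj
      exact h3 j (by omega) hj
  | succ len ih =>
    intro dp hlen h1 h2 h3
    have hc1 := Nat.one_le_two_pow (n := c)
    obtain ⟨l1, l2, l3, l4⟩ := ih dp (by omega) h1 h2 h3
    rw [show List.range' (2 ^ c) (len + 1) = List.range' (2 ^ c) len ++ [2 ^ c + 1 * len] from
          List.range'_concat, List.foldl_append]
    set P := (List.range' (2 ^ c) len).foldl (pvAStep m (2 ^ c)) dp with hP
    simp only [List.foldl_cons, List.foldl_nil]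
    have hiN : 2 ^ c + len ≤ N := by omega
    have key : pvAStep m (2 ^ c) P (2 ^ c + 1 * len)
        = P.set (2 ^ c + len) (Int.fmod (pvPw (c + 1) (2 ^ c + len)) m) := by
      rw [show 2 ^ c + 1 * len = 2 ^ c + len by omega]
      unfold pvAStep
      simp only [PySem.Int.mod]
      congr 1
      rw [l4 (2 ^ c + len) le_rfl hiN, show 2 ^ c + len - 2 ^ c = len by omega]
      have hx : pvPw (c + 1) (2 ^ c + len) = pvPw (c + 1) len + pvPw c (2 ^ c + len) := by
        rw [pvPw_succ c (2 ^ c + len), if_pos (by omega),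
            show 2 ^ c + len - 2 ^ c = len by omega]
      rcases Nat.eq_zero_or_pos len with hl0 | hl1
      · subst hl0
        rw [l2, hx, pvPw_zero_right, Int.fmod_add_fmod]
        push_cast
        ring_nf
      · rw [l3 len hl1 (by omega), hx, Int.fmod_add_fmod, Int.add_fmod_fmod]
        push_cast
        ring_nf
    rw [key]
    refine ⟨by rw [List.length_set]; exact l1, ?_, ?_, ?_⟩
    · rw [pvGetD_set, if_neg (by omega)]; exact l2
    · intro j hj1 hj2
      rw [pvGetD_set]
      by_cases hji : j = 2 ^ c + len
      · rw [if_pos ⟨hji.symm, by omega⟩, hji]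
      · rw [if_neg (by intro hcon; exact hji hcon.1.symm)]
        exact l3 j hj1 (by omega)
    · intro j hj1 hj2
      rw [pvGetD_set, if_neg (by omega)]
      exact l4 j (by omega) hj2

-- A's outer while-loop: starting from a pvPw c array with power = 2^c (and enough fuel),
-- it ends at pvBp reduced mod m
theorem pvA_loop (n m : Int) (hn : 0 < n) :
    ∀ (fuel c : Nat) (dp : List Int), n.toNat + 1 - 2 ^ c ≤ fuel →
    dp.length = n.toNat + 1 → dp.getD 0 0 = 1 →
    (∀ j, 1 ≤ j → j ≤ n.toNat → dp.getD j 0 = Int.fmod (pvPw c j) m) →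
    ∀ j, 1 ≤ j → j ≤ n.toNat →
      (pvALoop n m fuel (2 ^ c) dp).getD j 0 = Int.fmod (pvBp j) m := by
  intro fuel
  induction fuel with
  | zero =>
    intro c dp hf h1 h2 h3 j hj1 hj2
    rw [pvALoop, h3 j hj1 hj2]
    have hlt : j < 2 ^ c := by
      revert hf
      generalize (2 : Nat) ^ c = p
      intro hf
      omega
    have hcc : 1 ≤ c := by
      rcases Nat.eq_zero_or_pos c with h | h
      · exfalso
        subst h
        norm_num at hlt
        omega
      · exact h
    congr 1
    exact_mod_cast pvPw_eq_bp j c hcc hlt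
  | succ fuel ih =>
    intro c dp hf h1 h2 h3 j hj1 hj2
    rw [pvALoop]
    by_cases hc : ((2 ^ c : Nat) : Int) ≤ n
    · rw [if_pos ⟨Nat.one_le_two_pow, hc⟩]
      have hcN : 2 ^ c ≤ n.toNat := by omega
      obtain ⟨p1, p2, p3, _⟩ :=
        pvA_pass m n.toNat c (n.toNat + 1 - 2 ^ c) dp (by omega) h1 h2 h3
      have harg : (n + 1).toNat - 2 ^ c = n.toNat + 1 - 2 ^ c := by omega
      rw [show 2 ^ c * 2 = 2 ^ (c + 1) by rw [pow_succ]]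
      refine ih (c + 1) (pvAPass n m (2 ^ c) dp) ?_ ?_ ?_ ?_ j hj1 hj2
      · have hp : (2 : Nat) ^ (c + 1) = 2 * 2 ^ c := by rw [pow_succ]; ring
        have h1p := Nat.one_le_two_pow (n := c)
        revert hf hcN hp h1p
        generalize (2 : Nat) ^ c = p
        generalize (2 : Nat) ^ (c + 1) = q
        intro hf hcN hp h1p
        omega
      · unfold pvAPass; rw [harg]; exact p1
      · unfold pvAPass; rw [harg]; exact p2
      · intro j' hj'1 hj'2; unfold pvAPass; rw [harg]; exact p3 j' hj'1 (by omega)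
    · rw [if_neg (fun h => hc h.2)]
      rw [h3 j hj1 hj2]
      have hcc : 1 ≤ c := by
        rcases Nat.eq_zero_or_pos c with h | h
        · exfalso; apply hc; subst h; simpa using hn
        · exact h
      have hlt : j < 2 ^ c := by
        rcases Nat.lt_or_ge n.toNat (2 ^ c) with h | h
        · exact lt_of_le_of_lt hj2 h
        · exfalso
          apply hc
          have h' : ((2 ^ c : Nat) : Int) ≤ (n.toNat : Int) := Nat.cast_le.mpr h
          omega
      congr 1
      exact_mod_cast pvPw_eq_bp j c hcc hlt

-- ===== VERDICT (by name: the statement is the Claim_ definition above) =====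
theorem partition_powers_of_2_spec : Claim_equal_partition_powers_of_2 := by
  intro n mod hdom hpre
  unfold Spec_partition_powers_of_2
  obtain ⟨hn0, hpre2⟩ := hpre
  by_cases hn : n = 0
  · subst hn; rfl
  · have hnpos : 0 < n := lt_of_le_of_ne hn0 (Ne.symm hn)
    have hT : (n + 1).toNat = n.toNat + 1 := by omega
    have hN1 : 1 ≤ n.toNat := by omega
    have hA : partition_powers_of_2 n mod = Int.fmod (pvBp n.toNat) mod := by
      unfold partition_powers_of_2
      rw [if_neg hn, hT]
      refine pvA_loop n mod hnpos (n.toNat + 1) 0 _ (Nat.sub_le _ _) (by simp) ?_ ?_ n.toNat hN1 le_rfl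
      · rw [pvInit_getD n.toNat 0 (by omega)]; simp
      · intro j hj1 hj2
        rw [pvInit_getD n.toNat j hj2, if_neg (by omega), pvPw_base, if_neg (by omega)]
        simp [Int.zero_fmod]
    have hB : partition_powers_of_2_alt n mod = Int.fmod (pvBp n.toNat) mod := by
      unfold partition_powers_of_2_alt
      rw [if_neg hn, hT]
      rw [pvB_inv mod n.toNat n.toNat le_rfl n.toNat le_rfl,
          if_neg (by omega), if_pos le_rfl]
    rw [hA, hB]
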